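-- pv_equiv track=rewrite | github.com/Oujox/music-theory | music_theory/note/scale.py | generate_mask_by_key
-- ===== SOURCE A (Python) =====
-- def generate_mask_by_key(fs_count: int) -> list[int]:
--     mask = [0]*7
--     if fs_count > 0:
--         for i in range(0, fs_count):
--             mask[-((i*4)%7+1)] = 1
--     elif fs_count < 0:
--         for i in range(1, -fs_count+1):
--             mask[(i*4)%7-1] = -1
--     return mask
-- ===== SOURCE B (Python) =====
-- RANK_SHARP = [5, 3, 1, 6, 4, 2, 0]
-- RANK_FLAT = [1, 3, 5, 0, 2, 4, 6]
--
-- def generate_mask_by_key(fs_count: int) -> list[int]: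
--     if fs_count > 0:
--         return [1 if r < fs_count else 0 for r in RANK_SHARP]
--     if fs_count < 0:
--         return [-1 if r < -fs_count else 0 for r in RANK_FLAT]
--     return [0] * 7
-- ===== Notes on version B (the rewrite author's own statement) =====
-- stated objective: faster
-- what changed: B decides each fixed mask position directly from a precomputed rank table (constant work), instead of A's loop over the key-signature count writing positions via (i*4)%7 index arithmetic.
import Mathlib
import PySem

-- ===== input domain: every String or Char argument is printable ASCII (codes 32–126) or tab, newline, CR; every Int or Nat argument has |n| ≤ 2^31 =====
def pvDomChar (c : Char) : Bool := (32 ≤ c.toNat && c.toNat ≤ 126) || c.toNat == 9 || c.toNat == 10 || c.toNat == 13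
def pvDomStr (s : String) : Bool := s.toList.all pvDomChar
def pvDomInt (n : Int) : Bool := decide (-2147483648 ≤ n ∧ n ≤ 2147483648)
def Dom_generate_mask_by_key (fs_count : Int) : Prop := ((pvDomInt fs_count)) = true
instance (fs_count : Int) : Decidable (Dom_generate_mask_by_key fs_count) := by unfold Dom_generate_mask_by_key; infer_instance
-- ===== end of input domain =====

-- B decides each of the 7 fixed mask positions from a precomputed rank table instead of
-- A's count-driven loop writing positions via (i*4)%7; objective: alternative decomposition.

-- ===== PORT A =====
-- mask[-((i*4)%7+1)] = 1 : Python negative-index assignment, ported with PySem.List.pySetD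
-- (exact here: the index is always in range for a length-7 list).
def generate_mask_by_key (fs_count : Int) : List Int :=
  let mask : List Int := List.replicate 7 0
  if fs_count > 0 then
    (PySem.List.pyRange 0 fs_count 1).foldl
      (fun m i => PySem.List.pySetD m (-(PySem.Int.mod (i * 4) 7 + 1)) 1) mask
  else if fs_count < 0 then
    (PySem.List.pyRange 1 (-fs_count + 1) 1).foldl
      (fun m i => PySem.List.pySetD m (PySem.Int.mod (i * 4) 7 - 1) (-1)) mask
  else mask

-- ===== PORT B =====
def RANK_SHARP : List Int := [5, 3, 1, 6, 4, 2, 0]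
def RANK_FLAT : List Int := [1, 3, 5, 0, 2, 4, 6]

def generate_mask_by_key_alt (fs_count : Int) : List Int :=
  if fs_count > 0 then
    RANK_SHARP.map (fun r => if r < fs_count then 1 else 0)
  else if fs_count < 0 then
    RANK_FLAT.map (fun r => if r < -fs_count then -1 else 0)
  else List.replicate 7 0

-- ===== PRECONDITION & SPEC =====
def Spec_generate_mask_by_key (fs_count : Int) (out : List Int) : Prop := out = generate_mask_by_key_alt fs_count
instance (fs_count : Int) (out : List Int) : Decidable (Spec_generate_mask_by_key fs_count out) := by unfold Spec_generate_mask_by_key; infer_instance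

-- ===== CLAIM (what is proved, stated in full; the proofs are below) =====
def Claim_equal_generate_mask_by_key : Prop := ∀ (fs_count : Int), Dom_generate_mask_by_key fs_count → Spec_generate_mask_by_key fs_count (generate_mask_by_key fs_count)

-- ===== LEMMAS AND PROOFS =====

-- setting the written value into an already-saturated mask changes nothing:
theorem pySetD_ones (idx v : Int) (h1 : -7 ≤ idx) (h2 : idx < 7) :
    PySem.List.pySetD (List.replicate 7 v) idx v = List.replicate 7 v := by
  interval_cases idx <;>
    simp [PySem.List.pySetD, PySem.List.pySet?, PySem.List.pyIdx?]

theorem sharp_step_ones (i : Int) :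
    PySem.List.pySetD (List.replicate 7 (1 : Int)) (-(PySem.Int.mod (i * 4) 7 + 1)) 1
      = List.replicate 7 1 := by
  have h0 : 0 ≤ PySem.Int.mod (i * 4) 7 := PySem.Int.mod_nonneg _ (by norm_num)
  have h7 : PySem.Int.mod (i * 4) 7 < 7 := PySem.Int.mod_lt _ (by norm_num)
  exact pySetD_ones _ _ (by omega) (by omega)

theorem flat_step_ones (i : Int) :
    PySem.List.pySetD (List.replicate 7 (-1 : Int)) (PySem.Int.mod (i * 4) 7 - 1) (-1)
      = List.replicate 7 (-1) := by
  have h0 : 0 ≤ PySem.Int.mod (i * 4) 7 := PySem.Int.mod_nonneg _ (by norm_num)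
  have h7 : PySem.Int.mod (i * 4) 7 < 7 := PySem.Int.mod_lt _ (by norm_num)
  exact pySetD_ones _ _ (by omega) (by omega)

theorem foldl_sharp_ones (ys : List Int) :
    ys.foldl (fun m i => PySem.List.pySetD m (-(PySem.Int.mod (i * 4) 7 + 1)) 1)
      (List.replicate 7 (1 : Int)) = List.replicate 7 1 := by
  induction ys with
  | nil => rfl
  | cons y ys ih =>
    simp only [List.foldl_cons]
    rw [sharp_step_ones y]
    exact ih

theorem foldl_flat_ones (ys : List Int) :
    ys.foldl (fun m i => PySem.List.pySetD m (PySem.Int.mod (i * 4) 7 - 1) (-1))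
      (List.replicate 7 (-1 : Int)) = List.replicate 7 (-1) := by
  induction ys with
  | nil => rfl
  | cons y ys ih =>
    simp only [List.foldl_cons]
    rw [flat_step_ones y]
    exact ih

theorem big_sharp (n : Int) (h : 7 ≤ n) :
    generate_mask_by_key n = List.replicate 7 1 := by
  unfold generate_mask_by_key
  rw [if_pos (by omega : n > 0)]
  rw [PySem.List.pyRange_one_append 0 7 n (by omega) h]
  rw [List.foldl_append]
  have h7 : ((PySem.List.pyRange 0 7 1).foldl
      (fun m i => PySem.List.pySetD m (-(PySem.Int.mod (i * 4) 7 + 1)) 1)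
      (List.replicate 7 (0 : Int))) = List.replicate 7 1 := by decide
  rw [h7, foldl_sharp_ones]

theorem big_flat (n : Int) (h : n ≤ -7) :
    generate_mask_by_key n = List.replicate 7 (-1) := by
  unfold generate_mask_by_key
  rw [if_neg (by omega : ¬ n > 0), if_pos (by omega : n < 0)]
  rw [PySem.List.pyRange_one_append 1 8 (-n + 1) (by omega) (by omega)]
  rw [List.foldl_append]
  have h7 : ((PySem.List.pyRange 1 8 1).foldl
      (fun m i => PySem.List.pySetD m (PySem.Int.mod (i * 4) 7 - 1) (-1))
      (List.replicate 7 (0 : Int))) = List.replicate 7 (-1) := by decide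
  rw [h7, foldl_flat_ones]

theorem alt_big_sharp (n : Int) (h : 7 ≤ n) :
    generate_mask_by_key_alt n = List.replicate 7 1 := by
  unfold generate_mask_by_key_alt RANK_SHARP
  rw [if_pos (by omega : n > 0)]
  simp only [List.map]
  rw [if_pos (by omega : (5:Int) < n), if_pos (by omega : (3:Int) < n),
      if_pos (by omega : (1:Int) < n), if_pos (by omega : (6:Int) < n),
      if_pos (by omega : (4:Int) < n), if_pos (by omega : (2:Int) < n),
      if_pos (by omega : (0:Int) < n)]
  rfl

theorem alt_big_flat (n : Int) (h : n ≤ -7) :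
    generate_mask_by_key_alt n = List.replicate 7 (-1) := by
  unfold generate_mask_by_key_alt RANK_FLAT
  rw [if_neg (by omega : ¬ n > 0), if_pos (by omega : n < 0)]
  simp only [List.map]
  rw [if_pos (by omega : (1:Int) < -n), if_pos (by omega : (3:Int) < -n),
      if_pos (by omega : (5:Int) < -n), if_pos (by omega : (0:Int) < -n),
      if_pos (by omega : (2:Int) < -n), if_pos (by omega : (4:Int) < -n),
      if_pos (by omega : (6:Int) < -n)]
  rfl

-- ===== VERDICT (by name: the statement is the Claim_ definition above) =====
theorem generate_mask_by_key_spec : Claim_equal_generate_mask_by_key := by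
  intro n _
  unfold Spec_generate_mask_by_key
  by_cases h1 : 7 ≤ n
  · rw [big_sharp n h1, alt_big_sharp n h1]
  · by_cases h2 : n ≤ -7
    · rw [big_flat n h2, alt_big_flat n h2]
    · interval_cases n <;> decide
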